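-- pv_equiv track=rewrite | github.com/achobgood/wxops | src/wxcli/migration/transform/mappers/css_mapper.py | _category_matches_call_type
-- ===== SOURCE A (Python) =====
-- def _category_matches_call_type(
--     blocked_categories: frozenset[str],
--     call_type: str,
-- ) -> bool:
--     """Check if a Webex call type should be blocked based on blocked categories.
--
--     Maps the configurable category names (from category_rules) to Webex
--     OutgoingPermissionCallType enum values.
--
--     (from 03b-transform-mappers.md §7: callingPermissions field mapping)
--     """
--     # Mapping from our category names to Webex call type names
--     # This is configurable via category_rules — the webex_category values
--     # in the rules should match these keys.
--     category_to_call_type: dict[str, list[str]] = {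
--         "international": ["INTERNATIONAL"],
--         "premium": ["PREMIUM_SERVICES_I", "PREMIUM_SERVICES_II"],
--         "operator": ["OPERATOR_ASSISTED"],
--         "directory_assistance": ["CHARGEABLE_DIRECTORY_ASSISTED"],
--         "toll_free": ["TOLL_FREE"],
--         "national": ["NATIONAL"],
--         "special_services": ["SPECIAL_SERVICES_I", "SPECIAL_SERVICES_II"],
--         "internal": ["INTERNAL_CALL"],
--     }
--
--     for category in blocked_categories:
--         mapped_types = category_to_call_type.get(category, [])
--         if call_type in mapped_types:
--             return True
--
--     return False
-- ===== SOURCE B (Python) =====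
-- _CALL_TYPE_TO_CATEGORY: dict[str, str] = {
--     "INTERNATIONAL": "international",
--     "PREMIUM_SERVICES_I": "premium",
--     "PREMIUM_SERVICES_II": "premium",
--     "OPERATOR_ASSISTED": "operator",
--     "CHARGEABLE_DIRECTORY_ASSISTED": "directory_assistance",
--     "TOLL_FREE": "toll_free",
--     "NATIONAL": "national",
--     "SPECIAL_SERVICES_I": "special_services",
--     "SPECIAL_SERVICES_II": "special_services",
--     "INTERNAL_CALL": "internal",
-- }
--
--
-- def _category_matches_call_type(
--     blocked_categories: frozenset[str],
--     call_type: str,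
-- ) -> bool:
--     """Check if a Webex call type should be blocked based on blocked categories.
--
--     Inverted index: look up the single category owning call_type, then test
--     membership in blocked_categories. Unknown call types map to None, which
--     is never a blocked category, so the result is False there.
--     """
--     return _CALL_TYPE_TO_CATEGORY.get(call_type) in blocked_categories
-- ===== Notes on version B (the rewrite author's own statement) =====
-- stated objective: simpler
-- what changed: Replaces the loop over blocked_categories with its inner list-membership test by a precomputed inverted index call_type -> category: one dict lookup keyed on call_type plus one set-membership check; the loop disappears.
import Mathlib
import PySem

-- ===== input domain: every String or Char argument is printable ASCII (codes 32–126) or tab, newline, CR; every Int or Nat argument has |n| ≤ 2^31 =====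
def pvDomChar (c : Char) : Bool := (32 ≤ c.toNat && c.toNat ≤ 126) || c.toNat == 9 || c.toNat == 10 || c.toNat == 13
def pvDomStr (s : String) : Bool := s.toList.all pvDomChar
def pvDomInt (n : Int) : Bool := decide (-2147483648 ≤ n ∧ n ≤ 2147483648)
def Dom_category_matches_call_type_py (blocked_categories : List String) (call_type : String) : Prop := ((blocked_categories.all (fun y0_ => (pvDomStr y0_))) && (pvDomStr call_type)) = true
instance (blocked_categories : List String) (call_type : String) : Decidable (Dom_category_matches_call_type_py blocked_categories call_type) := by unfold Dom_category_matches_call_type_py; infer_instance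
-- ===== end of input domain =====

-- ===== PORT A =====
-- B inverts the category dict: one lookup keyed on call_type plus one membership test; the loop over blocked_categories disappears (objective: simpler).
-- dict.get(category, []) on the literal category_to_call_type dict
def pvCatToCallTypes (category : String) : List String :=
  if category = "international" then ["INTERNATIONAL"]
  else if category = "premium" then ["PREMIUM_SERVICES_I", "PREMIUM_SERVICES_II"]
  else if category = "operator" then ["OPERATOR_ASSISTED"]
  else if category = "directory_assistance" then ["CHARGEABLE_DIRECTORY_ASSISTED"]
  else if category = "toll_free" then ["TOLL_FREE"]
  else if category = "national" then ["NATIONAL"]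
  else if category = "special_services" then ["SPECIAL_SERVICES_I", "SPECIAL_SERVICES_II"]
  else if category = "internal" then ["INTERNAL_CALL"]
  else []

-- the for-loop with early return True, falling through to False
def category_matches_call_type_py (blocked_categories : List String) (call_type : String) : Bool :=
  match blocked_categories with
  | [] => false
  | category :: rest =>
      if (pvCatToCallTypes category).contains call_type then true
      else category_matches_call_type_py rest call_type

-- ===== PORT B =====
-- _CALL_TYPE_TO_CATEGORY.get(call_type)  (inverted index, returns None for unknown call types)
def pvCallTypeToCat (call_type : String) : Option String :=
  if call_type = "INTERNATIONAL" then some "international"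
  else if call_type = "PREMIUM_SERVICES_I" then some "premium"
  else if call_type = "PREMIUM_SERVICES_II" then some "premium"
  else if call_type = "OPERATOR_ASSISTED" then some "operator"
  else if call_type = "CHARGEABLE_DIRECTORY_ASSISTED" then some "directory_assistance"
  else if call_type = "TOLL_FREE" then some "toll_free"
  else if call_type = "NATIONAL" then some "national"
  else if call_type = "SPECIAL_SERVICES_I" then some "special_services"
  else if call_type = "SPECIAL_SERVICES_II" then some "special_services"
  else if call_type = "INTERNAL_CALL" then some "internal"
  else none

-- '_CALL_TYPE_TO_CATEGORY.get(call_type) in blocked_categories' (None is never a member: the set holds strings)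
def category_matches_call_type_py_alt (blocked_categories : List String) (call_type : String) : Bool :=
  match pvCallTypeToCat call_type with
  | some cat => blocked_categories.contains cat
  | none => false

-- ===== PRECONDITION & SPEC =====
def Spec_category_matches_call_type_py (blocked_categories : List String) (call_type : String) (out : Bool) : Prop := out = category_matches_call_type_py_alt blocked_categories call_type
instance (blocked_categories : List String) (call_type : String) (out : Bool) : Decidable (Spec_category_matches_call_type_py blocked_categories call_type out) := by unfold Spec_category_matches_call_type_py; infer_instance

-- ===== CLAIM =====
def Claim_equal_category_matches_call_type_py : Prop := ∀ (blocked_categories : List String) (call_type : String), Dom_category_matches_call_type_py blocked_categories call_type → Spec_category_matches_call_type_py blocked_categories call_type (category_matches_call_type_py blocked_categories call_type)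

-- ===== LEMMAS AND PROOFS =====
-- Per-category bridge: call_type lies in category's forward list iff the inverted index maps it back to category.
set_option maxHeartbeats 2000000 in
theorem pvCat_inv (category call_type : String) :
    (pvCatToCallTypes category).contains call_type = (pvCallTypeToCat call_type == some category) := by
  unfold pvCatToCallTypes pvCallTypeToCat
  split_ifs <;> subst_vars <;> simp_all [List.contains_eq_mem] <;>
    exact fun heq => absurd heq.symm (by assumption)

-- ===== VERDICT =====
theorem category_matches_call_type_py_spec : Claim_equal_category_matches_call_type_py := by
  intro blocked_categories call_type _h
  unfold Spec_category_matches_call_type_py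
  clear _h
  induction blocked_categories with
  | nil =>
      unfold category_matches_call_type_py category_matches_call_type_py_alt
      cases pvCallTypeToCat call_type <;> rfl
  | cons c rest ih =>
      rw [category_matches_call_type_py, pvCat_inv]
      unfold category_matches_call_type_py_alt at ih ⊢
      cases h : pvCallTypeToCat call_type with
      | none => simp [h] at ih ⊢; exact ih
      | some cat =>
          simp [h] at ih ⊢
          by_cases hc : cat = c
          · simp [hc]
          · simp [hc, ih]
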